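-- pv_equiv track=rewrite | github.com/Aluriak/pytest-asptest | asptest/parsers.py | asp_parse_test_case
-- ===== SOURCE A (Python) =====
-- def asp_parse_test_case(lines:[str]) -> [(str, [(bool, str)])]:
--     """Yield test cases as (input, outputs, strict).
--
--     input -- an ASP program ready to be grounded
--     outputs -- iterable describing content of each expected answer set,
--                with a boolean indicating if the given content is a subset of
--                the expected answer or not.
--
--     """
--     START_INPUT = '% INPUT'
--     START_OUTPUT = '% OUTPUT'
--     START_STRICT_OUTPUT = '% STRICT OUTPUT'
--     INSATISFIABLE = '% INSATISFIABLE'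
--
--     current_state, data_input, data_output = None, [], []
--
--     def format_yield():
--         return ''.join(data_input), tuple((''.join(lines), strict) for lines, strict in data_output)
--
--     for idx, line in enumerate(lines, start=1):
--         # detect end of test case
--         if line.startswith((START_INPUT, INSATISFIABLE)):
--             if data_output:
--                 yield format_yield()
--                 current_state, data_input, data_output = None, [], []
--
--         if line.startswith(START_INPUT):
--             current_state = data_input
--         elif line.startswith(START_OUTPUT):
--             data_output.append(([], False))  # new output lines, non strict
--             current_state = data_output[-1][0]
--         elif line.startswith(START_STRICT_OUTPUT):
--             data_output.append(([], True))  # new output lines, strict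
--             current_state = data_output[-1][0]
--         elif line.startswith(INSATISFIABLE):
--             current_state = None
--         elif line.strip():
--             if current_state is not None:
--                 current_state.append(line)
--             else:
--                 pass  # non empty line that doesn't belong to any place
--
--     if data_output:
--         yield format_yield()
-- ===== SOURCE B (Python) =====
-- def asp_parse_test_case(lines):
--     """Two-pass re-implementation: first label the lines into marker-opened
--     segments, then group the segments into test cases."""
--     # pass 1: segments, each (kind, strict, body)
--     segments = []
--     for line in lines:
--         if line.startswith('% STRICT OUTPUT'):
--             segments.append(('output', True, []))
--         elif line.startswith('% OUTPUT'):
--             segments.append(('output', False, []))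
--         elif line.startswith('% INPUT'):
--             segments.append(('input', False, []))
--         elif line.startswith('% INSATISFIABLE'):
--             segments.append(('insat', False, []))
--         elif line.strip() and segments:
--             segments[-1][2].append(line)
--     # pass 2: group segments into test cases
--     cases = []
--     inputs, outputs = [], []
--     for kind, strict, body in segments:
--         if kind == 'input':
--             if outputs:
--                 cases.append((''.join(inputs), tuple(outputs)))
--                 inputs, outputs = [], []
--             inputs.extend(body)
--         elif kind == 'output':
--             outputs.append((''.join(body), strict))
--         else:  # insat
--             if outputs:
--                 cases.append((''.join(inputs), tuple(outputs)))
--                 inputs, outputs = [], []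
--     if outputs:
--         cases.append((''.join(inputs), tuple(outputs)))
--     return cases
-- ===== Notes on version B (the rewrite author's own statement) =====
-- stated objective: alternative
-- what changed: Replaces A's single pass with a mutable cursor aliasing the input/output buffers by a two-phase pipeline: pass one labels lines into marker-opened segments (dropping blanks and stray lines), pass two folds the segment list into test cases, flushing when an INPUT/INSATISFIABLE segment follows pending outputs.
import Mathlib
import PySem

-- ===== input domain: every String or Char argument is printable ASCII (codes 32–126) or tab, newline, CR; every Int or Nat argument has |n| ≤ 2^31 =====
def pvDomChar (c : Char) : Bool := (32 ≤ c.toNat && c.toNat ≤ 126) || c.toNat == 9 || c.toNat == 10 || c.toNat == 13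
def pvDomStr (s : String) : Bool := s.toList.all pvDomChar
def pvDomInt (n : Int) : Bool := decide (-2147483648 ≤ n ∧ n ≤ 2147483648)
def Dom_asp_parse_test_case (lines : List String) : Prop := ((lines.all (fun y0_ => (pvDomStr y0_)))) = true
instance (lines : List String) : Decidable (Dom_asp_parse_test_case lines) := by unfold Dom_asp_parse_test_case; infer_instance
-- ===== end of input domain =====

-- B replaces A's single cursor-aliasing pass by a two-phase pipeline (label lines
-- into marker-opened segments, then fold the segments into test cases); alternative
-- decomposition, same behaviour and cost.

-- ===== PORT A =====
inductive PvCur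
  | non
  | inp
  | out
deriving DecidableEq, Repr

-- ''.join(data_input), tuple((''.join(lines), strict) …) — A's format_yield
def pvFmt (din : List String) (dout : List (List String × Bool)) : String × List (String × Bool) :=
  (PySem.Str.join "" din, dout.map (fun p => (PySem.Str.join "" p.1, p.2)))

-- current_state.append(line) when current_state aliases the last output's line list
def pvAppendLastBody (dout : List (List String × Bool)) (line : String) : List (List String × Bool) :=
  match dout with
  | [] => []
  | [p] => [(p.1 ++ [line], p.2)]
  | p :: q :: rest => p :: pvAppendLastBody (q :: rest) line

-- one iteration of A's for-loop over (acc, current_state, data_input, data_output)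
def pvAStep (st : List (String × List (String × Bool)) × PvCur × List String × List (List String × Bool))
    (line : String) : List (String × List (String × Bool)) × PvCur × List String × List (List String × Bool) :=
  let (acc, cur, din, dout) := st
  let (acc, cur, din, dout) :=
    if PySem.Str.startswith line "% INPUT" || PySem.Str.startswith line "% INSATISFIABLE" then
      if !dout.isEmpty then (acc ++ [pvFmt din dout], PvCur.non, [], [])
      else (acc, cur, din, dout)
    else (acc, cur, din, dout)
  if PySem.Str.startswith line "% INPUT" then (acc, PvCur.inp, din, dout)
  else if PySem.Str.startswith line "% OUTPUT" then (acc, PvCur.out, din, dout ++ [([], false)])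
  else if PySem.Str.startswith line "% STRICT OUTPUT" then (acc, PvCur.out, din, dout ++ [([], true)])
  else if PySem.Str.startswith line "% INSATISFIABLE" then (acc, PvCur.non, din, dout)
  else if PySem.Str.strip line ≠ "" then
    match cur with
    | PvCur.inp => (acc, cur, din ++ [line], dout)
    | PvCur.out => (acc, cur, din, pvAppendLastBody dout line)
    | PvCur.non => (acc, cur, din, dout)
  else (acc, cur, din, dout)

-- the trailing 'if data_output: yield format_yield()'
def pvFlushA (st : List (String × List (String × Bool)) × PvCur × List String × List (List String × Bool)) :
    List (String × List (String × Bool)) :=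
  match st with
  | (acc, _, din, dout) => if !dout.isEmpty then acc ++ [pvFmt din dout] else acc

def asp_parse_test_case (lines : List String) : List (String × (List (String × Bool))) :=
  pvFlushA (lines.foldl pvAStep ([], PvCur.non, [], []))

-- ===== PORT B =====
inductive PvKind
  | input
  | output
  | insat
deriving DecidableEq, Repr

structure PvSeg where
  kind : PvKind
  strict : Bool
  body : List String
deriving DecidableEq, Repr

-- segments[-1][2].append(line)
def pvAddBody (segs : List PvSeg) (line : String) : List PvSeg :=
  match segs with
  | [] => []
  | [s] => [⟨s.kind, s.strict, s.body ++ [line]⟩]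
  | s :: t :: rest => s :: pvAddBody (t :: rest) line

-- pass 1: one iteration labelling a line into the segment list
def pvP1Step (segs : List PvSeg) (line : String) : List PvSeg :=
  if PySem.Str.startswith line "% STRICT OUTPUT" then segs ++ [⟨PvKind.output, true, []⟩]
  else if PySem.Str.startswith line "% OUTPUT" then segs ++ [⟨PvKind.output, false, []⟩]
  else if PySem.Str.startswith line "% INPUT" then segs ++ [⟨PvKind.input, false, []⟩]
  else if PySem.Str.startswith line "% INSATISFIABLE" then segs ++ [⟨PvKind.insat, false, []⟩]
  else if PySem.Str.strip line ≠ "" ∧ segs ≠ [] then pvAddBody segs line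
  else segs

-- pass 2: one iteration grouping a segment into (cases, inputs, outputs)
def pvP2Step (st : List (String × List (String × Bool)) × List String × List (String × Bool))
    (seg : PvSeg) : List (String × List (String × Bool)) × List String × List (String × Bool) :=
  let (cases, inputs, outputs) := st
  match seg.kind with
  | PvKind.input =>
      let (cases, inputs, outputs) :=
        if !outputs.isEmpty then (cases ++ [(PySem.Str.join "" inputs, outputs)], [], [])
        else (cases, inputs, outputs)
      (cases, inputs ++ seg.body, outputs)
  | PvKind.output => (cases, inputs, outputs ++ [(PySem.Str.join "" seg.body, seg.strict)])
  | PvKind.insat =>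
      if !outputs.isEmpty then (cases ++ [(PySem.Str.join "" inputs, outputs)], [], [])
      else (cases, inputs, outputs)

-- the trailing 'if outputs: cases.append(…)'
def pvFlushB (st : List (String × List (String × Bool)) × List String × List (String × Bool)) :
    List (String × List (String × Bool)) :=
  match st with
  | (cases, inputs, outputs) =>
      if !outputs.isEmpty then cases ++ [(PySem.Str.join "" inputs, outputs)] else cases

def asp_parse_test_case_alt (lines : List String) : List (String × (List (String × Bool))) :=
  pvFlushB ((lines.foldl pvP1Step []).foldl pvP2Step ([], [], []))

-- ===== PRECONDITION & SPEC =====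
def Spec_asp_parse_test_case (lines : List String) (out : List (String × (List (String × Bool)))) : Prop := out = asp_parse_test_case_alt lines
instance (lines : List String) (out : List (String × (List (String × Bool)))) : Decidable (Spec_asp_parse_test_case lines out) := by unfold Spec_asp_parse_test_case; infer_instance

-- ===== CLAIM (what is proved, stated in full; the proofs are below) =====
def Claim_equal_asp_parse_test_case : Prop := ∀ (lines : List String), Dom_asp_parse_test_case lines → Spec_asp_parse_test_case lines (asp_parse_test_case lines)

-- ===== LEMMAS AND PROOFS =====

def pvMapJoin (dout : List (List String × Bool)) : List (String × Bool) :=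
  dout.map (fun p => (PySem.Str.join "" p.1, p.2))

-- invariant linking A's cursor/buffers to B's open (last) segment
def pvInv (closed : List PvSeg) (opn : Option PvSeg) (cur : PvCur)
    (dout : List (List String × Bool)) : Prop :=
  match cur with
  | PvCur.non => (opn = none ∧ closed = []) ∨ (∃ str b, opn = some ⟨PvKind.insat, str, b⟩)
  | PvCur.inp => ∃ str b, opn = some ⟨PvKind.input, str, b⟩
  | PvCur.out => ∃ str b dinit, opn = some ⟨PvKind.output, str, b⟩ ∧ dout = dinit ++ [(b, str)]

lemma pv_excl {line p q : String} (hp : PySem.Str.startswith line p = true)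
    (hq : PySem.Str.startswith line q = true) (hle : p.toList.length ≤ q.toList.length) :
    p.toList <+: q.toList := by
  simp only [PySem.Str.startswith_eq] at hp hq
  rw [PySem.Chars.startswith_iff] at hp hq
  exact List.prefix_of_prefix_length_le hp hq hle

lemma pvAddBody_append (xs : List PvSeg) (s : PvSeg) (l : String) :
    pvAddBody (xs ++ [s]) l = xs ++ [⟨s.kind, s.strict, s.body ++ [l]⟩] := by
  induction xs with
  | nil => rfl
  | cons x xs ih =>
    cases xs with
    | nil => rfl
    | cons y ys => simpa [pvAddBody] using ih

lemma pvAppendLastBody_append (xs : List (List String × Bool)) (p : List String × Bool)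
    (l : String) : pvAppendLastBody (xs ++ [p]) l = xs ++ [(p.1 ++ [l], p.2)] := by
  induction xs with
  | nil => rfl
  | cons x xs ih =>
    cases xs with
    | nil => rfl
    | cons y ys => simpa [pvAppendLastBody] using ih

lemma pvP2Step_input_body
    (q : List (String × List (String × Bool)) × List String × List (String × Bool))
    (str : Bool) (b : List String) (l : String) :
    pvP2Step q ⟨PvKind.input, str, b ++ [l]⟩ =
      ((pvP2Step q ⟨PvKind.input, str, b⟩).1,
       (pvP2Step q ⟨PvKind.input, str, b⟩).2.1 ++ [l],
       (pvP2Step q ⟨PvKind.input, str, b⟩).2.2) := by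
  obtain ⟨qc, qi, qo⟩ := q
  simp only [pvP2Step]
  split_ifs <;> simp

lemma pv_main : ∀ (rest : List String) (closed : List PvSeg) (opn : Option PvSeg)
    (acc : List (String × List (String × Bool))) (cur : PvCur) (din : List String)
    (dout : List (List String × Bool)),
    (closed ++ opn.toList).foldl pvP2Step ([], [], []) = (acc, din, pvMapJoin dout) →
    pvInv closed opn cur dout →
    pvFlushA (rest.foldl pvAStep (acc, cur, din, dout))
      = pvFlushB ((rest.foldl pvP1Step (closed ++ opn.toList)).foldl pvP2Step ([], [], [])) := by
  intro rest
  induction rest with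
  | nil =>
    intro closed opn acc cur din dout h1 hinv
    simp only [List.foldl_nil, h1]
    cases dout <;> simp [pvFlushA, pvFlushB, pvFmt, pvMapJoin]
  | cons line rest ih =>
    intro closed opn acc cur din dout h1 hinv
    simp only [List.foldl_cons]
    by_cases hSO : PySem.Str.startswith line "% STRICT OUTPUT" = true
    · have hO : PySem.Str.startswith line "% OUTPUT" = false :=
        Bool.eq_false_iff.mpr (fun h => absurd (pv_excl h hSO (by decide)) (by decide))
      have hI : PySem.Str.startswith line "% INPUT" = false :=
        Bool.eq_false_iff.mpr (fun h => absurd (pv_excl h hSO (by decide)) (by decide))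
      have hIn : PySem.Str.startswith line "% INSATISFIABLE" = false :=
        Bool.eq_false_iff.mpr (fun h => absurd (pv_excl hSO h (by decide)) (by decide))
      simp at hSO hO hI hIn
      rw [show pvAStep (acc, cur, din, dout) line
            = (acc, PvCur.out, din, dout ++ [([], true)]) by
          simp [pvAStep, hSO, hO, hI, hIn],
          show pvP1Step (closed ++ opn.toList) line
            = (closed ++ opn.toList) ++ [⟨PvKind.output, true, []⟩] by
          simp [pvP1Step, hSO]]
      refine ih (closed ++ opn.toList) (some ⟨PvKind.output, true, []⟩) acc PvCur.out din
        (dout ++ [([], true)]) ?_ ⟨true, [], dout, rfl, rfl⟩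
      rw [List.foldl_append, h1]
      simp [pvP2Step, pvMapJoin]
    · rw [Bool.not_eq_true] at hSO
      by_cases hO : PySem.Str.startswith line "% OUTPUT" = true
      · have hI : PySem.Str.startswith line "% INPUT" = false :=
          Bool.eq_false_iff.mpr (fun h => absurd (pv_excl h hO (by decide)) (by decide))
        have hIn : PySem.Str.startswith line "% INSATISFIABLE" = false :=
          Bool.eq_false_iff.mpr (fun h => absurd (pv_excl hO h (by decide)) (by decide))
        simp at hSO hO hI hIn
        rw [show pvAStep (acc, cur, din, dout) line
              = (acc, PvCur.out, din, dout ++ [([], false)]) by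
            simp [pvAStep, hO, hI, hIn],
            show pvP1Step (closed ++ opn.toList) line
              = (closed ++ opn.toList) ++ [⟨PvKind.output, false, []⟩] by
            simp [pvP1Step, hSO, hO]]
        refine ih (closed ++ opn.toList) (some ⟨PvKind.output, false, []⟩) acc PvCur.out din
          (dout ++ [([], false)]) ?_ ⟨false, [], dout, rfl, rfl⟩
        rw [List.foldl_append, h1]
        simp [pvP2Step, pvMapJoin]
      · rw [Bool.not_eq_true] at hO
        by_cases hI : PySem.Str.startswith line "% INPUT" = true
        · have hIn : PySem.Str.startswith line "% INSATISFIABLE" = false :=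
            Bool.eq_false_iff.mpr (fun h => absurd (pv_excl hI h (by decide)) (by decide))
          simp at hSO hO hI hIn
          rw [show pvP1Step (closed ++ opn.toList) line
                = (closed ++ opn.toList) ++ [⟨PvKind.input, false, []⟩] by
              simp [pvP1Step, hSO, hO, hI]]
          by_cases hd : dout = []
          · subst hd
            rw [show pvAStep (acc, cur, din, []) line = (acc, PvCur.inp, din, []) by
              simp [pvAStep, hI, hIn]]
            refine ih (closed ++ opn.toList) (some ⟨PvKind.input, false, []⟩) acc PvCur.inp din
              [] ?_ ⟨false, [], rfl⟩
            rw [List.foldl_append, h1]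
            simp [pvP2Step, pvMapJoin]
          · rw [show pvAStep (acc, cur, din, dout) line
                  = (acc ++ [pvFmt din dout], PvCur.inp, [], []) by
              simp [pvAStep, hI, hIn, hd]]
            refine ih (closed ++ opn.toList) (some ⟨PvKind.input, false, []⟩)
              (acc ++ [pvFmt din dout]) PvCur.inp [] [] ?_ ⟨false, [], rfl⟩
            rw [List.foldl_append, h1]
            simp [pvP2Step, pvMapJoin, pvFmt, hd]
        · rw [Bool.not_eq_true] at hI
          by_cases hIn : PySem.Str.startswith line "% INSATISFIABLE" = true
          · simp at hSO hO hI hIn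
            rw [show pvP1Step (closed ++ opn.toList) line
                  = (closed ++ opn.toList) ++ [⟨PvKind.insat, false, []⟩] by
                simp [pvP1Step, hSO, hO, hI, hIn]]
            by_cases hd : dout = []
            · subst hd
              rw [show pvAStep (acc, cur, din, []) line = (acc, PvCur.non, din, []) by
                simp [pvAStep, hSO, hO, hI, hIn]]
              refine ih (closed ++ opn.toList) (some ⟨PvKind.insat, false, []⟩) acc PvCur.non din
                [] ?_ (Or.inr ⟨false, [], rfl⟩)
              rw [List.foldl_append, h1]
              simp [pvP2Step, pvMapJoin]
            · rw [show pvAStep (acc, cur, din, dout) line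
                    = (acc ++ [pvFmt din dout], PvCur.non, [], []) by
                simp [pvAStep, hSO, hO, hI, hIn, hd]]
              refine ih (closed ++ opn.toList) (some ⟨PvKind.insat, false, []⟩)
                (acc ++ [pvFmt din dout]) PvCur.non [] [] ?_ (Or.inr ⟨false, [], rfl⟩)
              rw [List.foldl_append, h1]
              simp [pvP2Step, pvMapJoin, pvFmt, hd]
          · rw [Bool.not_eq_true] at hIn
            simp at hSO hO hI hIn
            by_cases hS : PySem.Str.strip line = ""
            · rw [show pvAStep (acc, cur, din, dout) line = (acc, cur, din, dout) by
                simp [pvAStep, hSO, hO, hI, hIn, hS],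
                show pvP1Step (closed ++ opn.toList) line = closed ++ opn.toList by
                simp [pvP1Step, hSO, hO, hI, hIn, hS]]
              exact ih closed opn acc cur din dout h1 hinv
            · cases cur with
              | non =>
                rw [show pvAStep (acc, PvCur.non, din, dout) line = (acc, PvCur.non, din, dout) by
                  simp [pvAStep, hSO, hO, hI, hIn, hS]]
                rcases hinv with ⟨hopn, hcl⟩ | ⟨str, b, hopn⟩
                · subst hopn; subst hcl
                  rw [show pvP1Step ([] ++ Option.toList (none (α := PvSeg))) line
                        = [] ++ Option.toList (none (α := PvSeg)) by
                      simp [pvP1Step, hSO, hO, hI, hIn]]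
                  exact ih [] none acc PvCur.non din dout h1 (Or.inl ⟨rfl, rfl⟩)
                · subst hopn -- insat open segment
                  rw [show pvP1Step (closed ++ Option.toList (some (⟨PvKind.insat, str, b⟩ : PvSeg))) line
                        = closed ++ Option.toList (some (⟨PvKind.insat, str, b ++ [line]⟩ : PvSeg)) by
                      simp [pvP1Step, hSO, hO, hI, hIn, hS, pvAddBody_append]]
                  refine ih closed (some ⟨PvKind.insat, str, b ++ [line]⟩) acc PvCur.non din dout
                    ?_ (Or.inr ⟨str, _, rfl⟩)
                  simpa only [Option.toList_some, List.foldl_append, List.foldl_cons,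
                    List.foldl_nil] using h1
              | inp =>
                rcases hinv with ⟨str, b, hopn⟩
                subst hopn
                rw [show pvAStep (acc, PvCur.inp, din, dout) line
                      = (acc, PvCur.inp, din ++ [line], dout) by
                    simp [pvAStep, hSO, hO, hI, hIn, hS],
                    show pvP1Step (closed ++ Option.toList (some (⟨PvKind.input, str, b⟩ : PvSeg))) line
                      = closed ++ Option.toList (some (⟨PvKind.input, str, b ++ [line]⟩ : PvSeg)) by
                    simp [pvP1Step, hSO, hO, hI, hIn, hS, pvAddBody_append]]
                refine ih closed (some ⟨PvKind.input, str, b ++ [line]⟩) acc PvCur.inp (din ++ [line])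
                  dout ?_ ⟨str, _, rfl⟩
                simp only [Option.toList_some, List.foldl_append, List.foldl_cons,
                  List.foldl_nil] at h1 ⊢
                rw [pvP2Step_input_body, h1]
              | out =>
                rcases hinv with ⟨str, b, dinit, hopn, hdout⟩
                subst hopn; subst hdout
                rw [show pvAStep (acc, PvCur.out, din, dinit ++ [(b, str)]) line
                      = (acc, PvCur.out, din, dinit ++ [(b ++ [line], str)]) by
                    simp [pvAStep, hSO, hO, hI, hIn, hS, pvAppendLastBody_append],
                    show pvP1Step (closed ++ Option.toList (some (⟨PvKind.output, str, b⟩ : PvSeg))) line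
                      = closed ++ Option.toList (some (⟨PvKind.output, str, b ++ [line]⟩ : PvSeg)) by
                    simp [pvP1Step, hSO, hO, hI, hIn, hS, pvAddBody_append]]
                refine ih closed (some ⟨PvKind.output, str, b ++ [line]⟩) acc PvCur.out din
                  (dinit ++ [(b ++ [line], str)]) ?_ ⟨str, _, dinit, rfl, rfl⟩
                simp only [Option.toList_some, List.foldl_append, List.foldl_cons,
                  List.foldl_nil] at h1 ⊢
                generalize hq : List.foldl pvP2Step ([], [], []) closed = q at h1 ⊢
                obtain ⟨qc, qi, qo⟩ := q
                simp only [pvP2Step, pvMapJoin, List.map_append, List.map_cons, List.map_nil,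
                  Prod.mk.injEq] at h1 ⊢
                obtain ⟨ha, hb, hc⟩ := h1
                exact ⟨ha, hb, by rw [List.append_cancel_right hc]⟩

-- ===== VERDICT (by name: the statement is the Claim_ definition above) =====
theorem asp_parse_test_case_spec : Claim_equal_asp_parse_test_case := by
  intro lines _
  unfold Spec_asp_parse_test_case asp_parse_test_case asp_parse_test_case_alt
  exact pv_main lines [] none [] PvCur.non [] [] rfl (Or.inl ⟨rfl, rfl⟩)
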